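-- pv_equiv track=rewrite | github.com/devYuMinKim/Coding_Test_with_JavaScript | 20220831/모범답안/20220831_10.js/DeliveryMan.py | makeArea
-- ===== SOURCE A (Python) =====
-- def makeArea(h, w, areaText):
--     # area 배열 생성
--     area = []
--
--     deliveryAvailableNum = 0
--     for i in range(h):
--         # area 이중 배열 생성
--         area.insert(i, [])
--
--         # area 값 설정
--         for j in range(w):
--             index = (w * i) + j
--             token = areaText[index]
--             value = 0 if token == '.' else 1
--             area[i].append(value)
--
--             if token == '.':
--                 deliveryAvailableNum += 1
--
--     isResolvable = deliveryAvailableNum % 3 == 0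
--     return area if isResolvable else None
-- ===== SOURCE B (Python) =====
-- def makeArea(h, w, areaText):
--     # No columns: every row is empty and zero dots is always divisible by 3.
--     if w <= 0:
--         return [[] for _ in range(h)]
--     # Pass 1: one flat 1-D scan over all h*w cells.
--     flat = [0 if areaText[k] == '.' else 1 for k in range(h * w)]
--     # Pass 2: decide resolvability on the flat list, before any row exists.
--     if flat.count(0) % 3:
--         return None
--     # Pass 3: chunk the flat list into rows by slicing.
--     return [flat[w * i : w * i + w] for i in range(h)]
-- ===== Notes on version B (the rewrite author's own statement) =====
-- stated objective: alternative
-- what changed: B replaces A's nested row-building loop with inline counter by a flat 1-D representation: a guard for w<=0, one flat pass over range(h*w) building a 1-D 0/1 list, a count on that flat list deciding resolvability before any row exists, and a final chunking of the flat list into rows by slicing.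
import Mathlib
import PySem

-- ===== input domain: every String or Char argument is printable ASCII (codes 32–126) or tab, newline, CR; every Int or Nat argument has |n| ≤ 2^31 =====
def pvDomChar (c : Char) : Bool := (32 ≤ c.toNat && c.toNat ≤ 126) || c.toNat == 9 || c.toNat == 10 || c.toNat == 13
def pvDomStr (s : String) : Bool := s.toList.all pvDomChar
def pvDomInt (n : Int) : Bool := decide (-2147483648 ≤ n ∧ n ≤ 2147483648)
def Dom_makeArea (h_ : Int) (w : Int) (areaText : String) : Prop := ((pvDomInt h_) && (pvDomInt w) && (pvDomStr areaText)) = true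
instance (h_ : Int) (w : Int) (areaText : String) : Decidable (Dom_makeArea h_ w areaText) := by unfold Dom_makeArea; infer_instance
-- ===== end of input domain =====

-- B replaces A's nested row-building loop (with an inline dot counter) by a flat 1-D pass,
-- a count on the flat list, then chunking into rows by slicing; same cost ("alternative").

-- ===== PORT A =====
-- one step of A's inner loop over j: read areaText[(w*i)+j], append the 0/1 value to the
-- current row (A's area[i]) and bump deliveryAvailableNum on '.'; none = IndexError
def stepA (w : Int) (areaText : String) (i : Int)
    (st : Option (List Int × Int)) (j : Int) : Option (List Int × Int) :=
  st.bind fun rn =>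
    let index := w * i + j
    (PySem.Str.pyGet? areaText index).map fun token =>
      let value : Int := if token = '.' then 0 else 1
      (rn.1 ++ [value], if token = '.' then rn.2 + 1 else rn.2)

-- A's inner 'for j in range(w)' starting from a fresh row (area.insert(i, [])) and the
-- running count num
def makeAreaInnerA (w : Int) (areaText : String) (i : Int) (num : Int) :
    Option (List Int × Int) :=
  (PySem.List.pyRange 0 w 1).foldl (stepA w areaText i) (some ([], num))

-- one step of A's outer loop over i: run the inner loop, put the finished row at the end
def ostepA (w : Int) (areaText : String)
    (st : Option (List (List Int) × Int)) (i : Int) : Option (List (List Int) × Int) :=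
  st.bind fun an =>
    (makeAreaInnerA w areaText i an.2).map fun rn => (an.1 ++ [rn.1], rn.2)

def makeArea (h_ : Int) (w : Int) (areaText : String) : Option (List (List Int)) :=
  match (PySem.List.pyRange 0 h_ 1).foldl (ostepA w areaText) (some ([], (0 : Int))) with
  | none => none  -- Python raises IndexError here (excluded by Pre_)
  | some (area, deliveryAvailableNum) =>
      if deliveryAvailableNum % 3 = 0 then some area else none

-- ===== PORT B =====
-- B's flat pass: one step of '[0 if areaText[k] == '.' else 1 for k in range(h*w)]'
def flatStep (areaText : String) (st : Option (List Int)) (k : Int) : Option (List Int) :=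
  st.bind fun acc =>
    (PySem.Str.pyGet? areaText k).map fun token =>
      acc ++ [if token = '.' then (0 : Int) else 1]

def makeArea_alt (h_ : Int) (w : Int) (areaText : String) : Option (List (List Int)) :=
  if w ≤ 0 then
    -- no columns: '[[] for _ in range(h)]'
    some ((PySem.List.pyRange 0 h_ 1).map (fun _ => ([] : List Int)))
  else
    match (PySem.List.pyRange 0 (h_ * w) 1).foldl (flatStep areaText) (some []) with
    | none => none  -- Python raises IndexError here (excluded by Pre_)
    | some flat =>
        -- 'if flat.count(0) % 3: return None'
        if PySem.List.count flat (0 : Int) % 3 ≠ 0 then none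
        else
          -- '[flat[w*i : w*i+w] for i in range(h)]'
          some ((PySem.List.pyRange 0 h_ 1).map
            (fun i => PySem.List.slice flat (some (w * i)) (some (w * i + w))))

-- ===== PRECONDITION & SPEC =====
-- Pre_ excludes exactly the too-short texts (h>0, w>0, len(areaText) < h*w) on which
-- both Pythons raise IndexError at areaText[k].
def Pre_makeArea (h_ : Int) (w : Int) (areaText : String) : Prop :=
  ¬ (0 < h_ ∧ 0 < w ∧ (PySem.Str.len areaText : Int) < h_ * w)
instance (h_ : Int) (w : Int) (areaText : String) : Decidable (Pre_makeArea h_ w areaText) := by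
  unfold Pre_makeArea; infer_instance

def pvWitness_makeArea : Int × Int × String := (2, 3, ".X..X.")

def Spec_makeArea (h_ : Int) (w : Int) (areaText : String) (out : Option (List (List Int))) : Prop := out = makeArea_alt h_ w areaText
instance (h_ : Int) (w : Int) (areaText : String) (out : Option (List (List Int))) : Decidable (Spec_makeArea h_ w areaText out) := by unfold Spec_makeArea; infer_instance

-- ===== CLAIM (what is proved, stated in full; the proofs are below) =====
def Claim_equal_makeArea : Prop := ∀ (h_ : Int) (w : Int) (areaText : String), Dom_makeArea h_ w areaText → Pre_makeArea h_ w areaText → Spec_makeArea h_ w areaText (makeArea h_ w areaText)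

-- ===== LEMMAS AND PROOFS =====

-- a fold whose step maps none to none keeps none
theorem foldl_none {α β : Type} (f : Option α → β → Option α)
    (hf : ∀ x, f none x = none) : ∀ l : List β, l.foldl f none = none := by
  intro l; induction l with
  | nil => rfl
  | cons a l ih => simp [List.foldl_cons, hf, ih]

-- proof-side reformulation of A without the counter: build row i alone, rows alone
def stepB (w : Int) (areaText : String) (i : Int)
    (st : Option (List Int)) (j : Int) : Option (List Int) :=
  st.bind fun row =>
    (PySem.Str.pyGet? areaText (w * i + j)).map fun token =>
      row ++ [if token = '.' then (0 : Int) else 1]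

def makeAreaRowB (w : Int) (areaText : String) (i : Int) : Option (List Int) :=
  (PySem.List.pyRange 0 w 1).foldl (stepB w areaText i) (some [])

def ostepB (w : Int) (areaText : String)
    (st : Option (List (List Int))) (i : Int) : Option (List (List Int)) :=
  st.bind fun rows => (makeAreaRowB w areaText i).map fun r => rows ++ [r]

-- Int-valued count of zeros in a row
def cnt0 (r : List Int) : Int := (PySem.List.count r (0 : Int) : Int)

theorem cnt0_append (r : List Int) (v : Int) :
    cnt0 (r ++ [v]) = cnt0 r + (if v = 0 then 1 else 0) := by
  simp [cnt0, PySem.List.count, List.count_append, List.count_singleton]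

-- A's inner fold is the counter-free inner fold paired with the running count of zeros
theorem innerA_eq_rowB (w : Int) (areaText : String) (i : Int) :
    ∀ (js : List Int) (row : List Int) (num : Int),
      js.foldl (stepA w areaText i) (some (row, num)) =
      (js.foldl (stepB w areaText i) (some row)).map
        (fun r => (r, num - cnt0 row + cnt0 r)) := by
  intro js
  induction js with
  | nil => intro row num; simp
  | cons j js ih =>
      intro row num
      simp only [List.foldl_cons]
      cases hg : PySem.List.pyGet? areaText.toList (w * i + j) with
      | none =>
          rw [show stepA w areaText i (some (row, num)) j = none by
                simp [stepA, PySem.Str.pyGet?, hg],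
              show stepB w areaText i (some row) j = none by
                simp [stepB, PySem.Str.pyGet?, hg],
              foldl_none _ (fun x => rfl), foldl_none _ (fun x => rfl)]
          rfl
      | some token =>
          rw [show stepA w areaText i (some (row, num)) j =
                some (row ++ [if token = '.' then (0:Int) else 1],
                      if token = '.' then num + 1 else num) by
                simp [stepA, PySem.Str.pyGet?, hg],
              show stepB w areaText i (some row) j =
                some (row ++ [if token = '.' then (0:Int) else 1]) by
                simp [stepB, PySem.Str.pyGet?, hg],
              ih]
          cases js.foldl (stepB w areaText i)
              (some (row ++ [if token = '.' then (0:Int) else 1])) with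
          | none => rfl
          | some r =>
              simp only [Option.map_some, Option.some.injEq, Prod.mk.injEq, true_and]
              rw [cnt0_append]
              by_cases ht : token = '.' <;> simp [ht]

-- sum of per-row zero counts
def sumCnt (a : List (List Int)) : Int := (a.map fun row => (PySem.List.count row (0 : Int) : Int)).sum

theorem sumCnt_append (a : List (List Int)) (r : List Int) :
    sumCnt (a ++ [r]) = sumCnt a + cnt0 r := by
  simp [sumCnt, cnt0]

-- A's outer fold is the counter-free outer fold paired with the running total of zeros
theorem outerA_eq_outerB (w : Int) (areaText : String) :
    ∀ (is_ : List Int) (area : List (List Int)) (num : Int),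
      is_.foldl (ostepA w areaText) (some (area, num)) =
      (is_.foldl (ostepB w areaText) (some area)).map
        (fun ar => (ar, num - sumCnt area + sumCnt ar)) := by
  intro is_
  induction is_ with
  | nil => intro area num; simp
  | cons i is_ ih =>
      intro area num
      simp only [List.foldl_cons]
      have hrow : makeAreaInnerA w areaText i num =
          (makeAreaRowB w areaText i).map (fun r => (r, num + cnt0 r)) := by
        rw [makeAreaInnerA, makeAreaRowB, innerA_eq_rowB]
        cases (PySem.List.pyRange 0 w 1).foldl (stepB w areaText i) (some []) with
        | none => rfl
        | some r => simp [cnt0, PySem.List.count]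
      cases hb : makeAreaRowB w areaText i with
      | none =>
          rw [show ostepA w areaText (some (area, num)) i = none by
                simp [ostepA, hrow, hb],
              show ostepB w areaText (some area) i = none by
                simp [ostepB, hb],
              foldl_none _ (fun x => rfl), foldl_none _ (fun x => rfl)]
          rfl
      | some r =>
          rw [show ostepA w areaText (some (area, num)) i =
                some (area ++ [r], num + cnt0 r) by
                simp [ostepA, hrow, hb],
              show ostepB w areaText (some area) i = some (area ++ [r]) by
                simp [ostepB, hb],
              ih]
          cases is_.foldl (ostepB w areaText) (some (area ++ [r])) with
          | none => rfl
          | some ar =>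
              simp only [Option.map_some, Option.some.injEq, Prod.mk.injEq, true_and]
              rw [sumCnt_append]; ring

-- accumulator extraction for B's flat fold
theorem flat_acc (s : String) : ∀ (l : List Int) (acc : List Int),
    l.foldl (flatStep s) (some acc) =
      (l.foldl (flatStep s) (some [])).map (fun f => acc ++ f) := by
  intro l
  induction l with
  | nil => intro acc; simp
  | cons k l ih =>
      intro acc
      simp only [List.foldl_cons]
      cases hg : PySem.List.pyGet? s.toList k with
      | none =>
          rw [show flatStep s (some acc) k = none by simp [flatStep, PySem.Str.pyGet?, hg],
              show flatStep s (some []) k = none by simp [flatStep, PySem.Str.pyGet?, hg],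
              foldl_none _ (fun x => rfl)]
          rfl
      | some token =>
          rw [show flatStep s (some acc) k =
                some (acc ++ [if token = '.' then (0:Int) else 1]) by
                simp [flatStep, PySem.Str.pyGet?, hg],
              show flatStep s (some []) k =
                some ([if token = '.' then (0:Int) else 1]) by
                simp [flatStep, PySem.Str.pyGet?, hg],
              ih, ih [if token = '.' then (0:Int) else 1]]
          cases l.foldl (flatStep s) (some []) with
          | none => rfl
          | some f => simp

-- a successful flat fold produces one value per index
theorem flat_len (s : String) : ∀ (l : List Int) (acc flat : List Int),
    l.foldl (flatStep s) (some acc) = some flat → flat.length = acc.length + l.length := by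
  intro l
  induction l with
  | nil => intro acc flat h; simp at h; simp [← h]
  | cons k l ih =>
      intro acc flat h
      simp only [List.foldl_cons] at h
      cases hg : PySem.List.pyGet? s.toList k with
      | none =>
          rw [show flatStep s (some acc) k = none by simp [flatStep, PySem.Str.pyGet?, hg],
              foldl_none _ (fun x => rfl)] at h
          exact absurd h (by simp)
      | some token =>
          rw [show flatStep s (some acc) k =
                some (acc ++ [if token = '.' then (0:Int) else 1]) by
                simp [flatStep, PySem.Str.pyGet?, hg]] at h
          have := ih _ _ h
          simp at this
          simp [this]; omega

-- the counter-free inner fold is a flat fold over the shifted index range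
theorem rowB_as_flat (w : Int) (s : String) (i : Int) :
    makeAreaRowB w s i =
      (PySem.List.pyRange (w * i) (w * i + w) 1).foldl (flatStep s) (some []) := by
  rw [makeAreaRowB, show PySem.List.pyRange (w*i) (w*i+w) 1 =
        (PySem.List.pyRange 0 w 1).map (fun j => w * i + j) by
      rw [PySem.List.pyRange_one, PySem.List.pyRange_one]
      simp [Function.comp_def]]
  rw [List.foldl_map]
  rfl

-- slicing a block that lies inside the prefix ignores the appended suffix
theorem slice_prefix (flat row : List Int) (a b : Int) (ha : 0 ≤ a) (hab : a ≤ b)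
    (hb : b.toNat ≤ flat.length) :
    PySem.List.slice (flat ++ row) (some a) (some b) = PySem.List.slice flat (some a) (some b) := by
  rw [PySem.List.slice_toNat _ ha (ha.trans hab), PySem.List.slice_toNat _ ha (ha.trans hab),
      List.drop_append_of_le_length (by omega),
      List.take_append_of_le_length (by simp [List.length_drop]; omega)]

-- slicing exactly the appended suffix returns it
theorem slice_exact (flat row : List Int) (a b : Int) (ha : 0 ≤ a)
    (hlen : (flat.length : Int) = a) (hrow : (row.length : Int) = b - a) :
    PySem.List.slice (flat ++ row) (some a) (some b) = row := by
  have hb : (0:Int) ≤ b := by omega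
  rw [PySem.List.slice_toNat _ ha hb,
      show a.toNat = flat.length by omega, List.drop_left,
      show b.toNat - flat.length = row.length by omega, List.take_length]

-- a successful row fold has one entry per column
theorem row_len (w : Int) (s : String) (i : Int) (row : List Int)
    (h : makeAreaRowB w s i = some row) : (row.length : Int) = max w 0 := by
  rw [rowB_as_flat] at h
  have := flat_len s _ _ _ h
  rw [PySem.List.length_pyRange_one] at this
  simp at this
  omega

-- main lemma: the counter-free outer fold equals B's flat-then-chunk computation
theorem main_chunks (w : Int) (s : String) (hw : 0 < w) : ∀ n : Nat,
    match (PySem.List.pyRange 0 ((n : Int) * w) 1).foldl (flatStep s) (some []) with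
    | none => (PySem.List.pyRange 0 (n : Int) 1).foldl (ostepB w s) (some []) = none
    | some flat =>
        (flat.length : Int) = (n : Int) * w ∧
        (PySem.List.pyRange 0 (n : Int) 1).foldl (ostepB w s) (some []) =
          some ((PySem.List.pyRange 0 (n : Int) 1).map
            (fun i => PySem.List.slice flat (some (w * i)) (some (w * i + w)))) ∧
        sumCnt ((PySem.List.pyRange 0 (n : Int) 1).map
            (fun i => PySem.List.slice flat (some (w * i)) (some (w * i + w)))) =
          (PySem.List.count flat (0 : Int) : Int) := by
  intro n
  induction n with
  | zero =>
      simp only [Nat.cast_zero, zero_mul]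
      rw [PySem.List.pyRange_one_eq_nil le_rfl]
      simp [sumCnt]
  | succ n ih =>
      have hNn : (0:Int) ≤ (n:Int) := Int.natCast_nonneg n
      have hNw : (0:Int) ≤ (n:Int) * w := mul_nonneg hNn hw.le
      have e1 : ((n+1:Nat):Int) * w = (n:Int) * w + w := by push_cast; ring
      have e2 : ((n+1:Nat):Int) = (n:Int) + 1 := by push_cast; ring
      rw [e1, e2,
          PySem.List.pyRange_one_append 0 ((n:Int)*w) ((n:Int)*w + w) hNw (by omega),
          List.foldl_append,
          PySem.List.pyRange_one_succ_right hNn,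
          List.foldl_append]
      cases hF : (PySem.List.pyRange 0 ((n:Int) * w) 1).foldl (flatStep s) (some []) with
      | none =>
          rw [hF] at ih
          rw [foldl_none _ (fun x => rfl)]
          simp only [List.foldl_cons, List.foldl_nil, ih]
          rfl
      | some flat =>
          rw [hF] at ih
          obtain ⟨hlen, hB0, hsum⟩ := ih
          rw [show ((n:Int) * w) = w * (n:Int) from mul_comm _ _, flat_acc, ← rowB_as_flat]
          cases hr : makeAreaRowB w s (n:Int) with
          | none =>
              simp only [Option.map_none, List.foldl_cons, List.foldl_nil, hB0]
              rw [show ostepB w s (some ((PySem.List.pyRange 0 (n:Int) 1).map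
                    (fun i => PySem.List.slice flat (some (w * i)) (some (w * i + w)))))
                    (n:Int) = none by simp [ostepB, hr]]
          | some row =>
              have hlen' : (flat.length : Int) = w * (n:Int) := by rw [hlen]; ring
              have hrl : (row.length : Int) = w := by
                have := row_len w s (n:Int) row hr; omega
              have hmap : ∀ i ∈ PySem.List.pyRange 0 (n:Int) 1,
                  PySem.List.slice (flat ++ row) (some (w * i)) (some (w * i + w)) =
                  PySem.List.slice flat (some (w * i)) (some (w * i + w)) := by
                intro i hi
                rw [PySem.List.mem_pyRange_one] at hi
                have hwi : (0:Int) ≤ w * i := mul_nonneg hw.le hi.1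
                have hfit : w * i + w ≤ (n:Int) * w := by nlinarith [hi.2]
                exact slice_prefix flat row _ _ hwi (by omega) (by omega)
              have hlast : PySem.List.slice (flat ++ row) (some (w * (n:Int)))
                  (some (w * (n:Int) + w)) = row :=
                slice_exact flat row _ _ (by nlinarith) (by omega) (by omega)
              simp only [Option.map_some, List.foldl_cons, List.foldl_nil, hB0]
              rw [show ostepB w s (some ((PySem.List.pyRange 0 (n:Int) 1).map
                    (fun i => PySem.List.slice flat (some (w * i)) (some (w * i + w)))))
                    (n:Int) = some (((PySem.List.pyRange 0 (n:Int) 1).map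
                    (fun i => PySem.List.slice flat (some (w * i)) (some (w * i + w)))) ++ [row])
                  by simp [ostepB, hr]]
              refine ⟨by simp; omega, ?_, ?_⟩
              · rw [List.map_append, List.map_congr_left hmap]
                simp [hlast]
              · rw [List.map_append, List.map_congr_left hmap]
                simp only [List.map_cons, List.map_nil, hlast]
                rw [sumCnt_append, hsum]
                simp [cnt0, PySem.List.count, List.count_append]

-- when w ≤ 0 A's inner loop is empty: every row is [] and the counter never moves
theorem foldA_wnonpos (w : Int) (s : String) (hw : w ≤ 0) :
    ∀ (l : List Int) (rows : List (List Int)) (num : Int),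
      l.foldl (ostepA w s) (some (rows, num)) =
        some (rows ++ l.map (fun _ => ([] : List Int)), num) := by
  intro l
  induction l with
  | nil => intro rows num; simp
  | cons i l ih =>
      intro rows num
      have hr : makeAreaInnerA w s i num = some ([], num) := by
        rw [makeAreaInnerA, PySem.List.pyRange_one_eq_nil hw]; rfl
      simp only [List.foldl_cons]
      rw [show ostepA w s (some (rows, num)) i = some (rows ++ [[]], num) by
            simp [ostepA, hr], ih]
      simp

-- for negative h the ranges are empty, so h may be replaced by h.toNat
theorem range_toNat (h_ : Int) :
    PySem.List.pyRange 0 h_ 1 = PySem.List.pyRange 0 ((h_.toNat : Int)) 1 := by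
  rcases (by omega : 0 ≤ h_ ∨ h_ < 0) with h | h
  · rw [Int.toNat_of_nonneg h]
  · rw [PySem.List.pyRange_one_eq_nil h.le, PySem.List.pyRange_one_eq_nil (by omega)]

theorem range_mul_toNat (h_ w : Int) (hw : 0 < w) :
    PySem.List.pyRange 0 (h_ * w) 1 = PySem.List.pyRange 0 ((h_.toNat : Int) * w) 1 := by
  rcases (by omega : 0 ≤ h_ ∨ h_ < 0) with h | h
  · rw [Int.toNat_of_nonneg h]
  · rw [PySem.List.pyRange_one_eq_nil (by nlinarith),
        PySem.List.pyRange_one_eq_nil (by simp [Int.toNat_of_nonpos h.le])]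

-- ===== VERDICT (by name: the statement is the Claim_ definition above) =====
theorem makeArea_spec : Claim_equal_makeArea := by
  intro h_ w s _ _
  unfold Spec_makeArea makeArea makeArea_alt
  by_cases hw : w ≤ 0
  · rw [foldA_wnonpos w s hw, if_pos hw]
    simp
  · rw [not_le] at hw
    rw [if_neg (not_le.mpr hw), outerA_eq_outerB, range_toNat h_, range_mul_toNat h_ w hw]
    have H := main_chunks w s hw h_.toNat
    cases hF : (PySem.List.pyRange 0 ((h_.toNat : Int) * w) 1).foldl (flatStep s) (some []) with
    | none =>
        rw [hF] at H
        rw [H]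
        rfl
    | some flat =>
        rw [hF] at H
        obtain ⟨hlen, hB0, hsum⟩ := H
        rw [hB0]
        simp only [Option.map_some]
        have hz : (0:Int) - sumCnt [] + sumCnt ((PySem.List.pyRange 0 ((h_.toNat : Int)) 1).map
            (fun i => PySem.List.slice flat (some (w * i)) (some (w * i + w)))) =
            (PySem.List.count flat (0 : Int) : Int) := by
          rw [← hsum]; simp [sumCnt]
        rw [show ((0:Int) - sumCnt []) = - sumCnt [] from by ring] at hz
        refine Eq.trans ?_ rfl
        show (if ((0:Int) - sumCnt [] + sumCnt _) % 3 = 0 then some _ else none) = _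
        rw [show ((0:Int) - sumCnt []) = - sumCnt [] from by ring, hz]
        split_ifs with h1 h2 h3
        · exact absurd h1 (by omega)
        · rfl
        · rfl
        · exact absurd (by omega) h1
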